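-- pv_equiv track=rewrite | github.com/saichetan1234/leetcode-solution | 3931-process-string-with-special-operations-i/process-string-with-special-operations-i.py | processStr
-- ===== SOURCE A (Python) =====
-- def processStr(s: str) -> str:
--     res = []
--
--     for i in s:
--         if i.islower():
--             res.append(i)
--         elif i == "#":
--             res = res + res
--         elif i == "*" and len(res) > 0:
--             res.pop()
--         else:
--             res = res[::-1]
--     return "".join(res)
-- ===== SOURCE B (Python) =====
-- def processStr(s: str) -> str:
--     # Deferred-reversal representation: the logical string is front[::-1] + back,
--     # so a reversal op is just a swap of the two lists.
--     front = []  # logical prefix, stored in reversed order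
--     back = []   # logical suffix, in order
--     for c in s:
--         if c.islower():
--             back.append(c)
--         elif c == "#":
--             back = back + front[::-1] + back
--         elif c == "*" and (front or back):
--             if not back:
--                 back = front[::-1]
--                 front = []
--             back.pop()
--         else:
--             front, back = back, front
--     return "".join(reversed(front)) + "".join(back)
-- ===== Notes on version B (the rewrite author's own statement) =====
-- stated objective: alternative
-- what changed: B keeps the string as two stacks (reversed prefix, suffix): a reversal op becomes a swap of the two lists instead of A's whole-buffer copy res[::-1], with appends and pops done on the near end.
import Mathlib
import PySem

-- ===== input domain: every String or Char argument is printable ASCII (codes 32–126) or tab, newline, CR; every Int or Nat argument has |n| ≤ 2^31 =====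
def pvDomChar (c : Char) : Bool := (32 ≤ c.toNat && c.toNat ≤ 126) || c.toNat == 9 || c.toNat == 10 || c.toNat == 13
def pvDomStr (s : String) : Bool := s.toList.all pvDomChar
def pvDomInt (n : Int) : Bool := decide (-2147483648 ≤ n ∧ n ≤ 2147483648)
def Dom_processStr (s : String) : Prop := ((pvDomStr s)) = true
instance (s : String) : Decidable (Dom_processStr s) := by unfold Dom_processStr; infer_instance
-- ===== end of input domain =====

-- B represents the buffer as two stacks (reversed prefix, suffix), so a reversal op
-- is a swap of the two lists instead of A's buffer copy: objective = alternative algorithm.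

-- ===== PORT A =====
-- one loop step of A's body over the running list res
def processStrStepA (res : List Char) (i : Char) : List Char :=
  if PySem.Chars.islower i then res ++ [i]
  else if i == '#' then res ++ res
  else if i == '*' && decide (0 < res.length) then
    -- res.pop(): guard ensures nonempty, so pop? is some
    match PySem.List.pop? res (-1) with
    | some (_, r) => r
    | none => res
  else
    -- res = res[::-1]
    (PySem.List.slice? res none none (-1)).getD res

def processStr (s : String) : String :=
  String.ofList (s.toList.foldl processStrStepA [])

-- ===== PORT B =====
-- one loop step of B's body over the state (front, back); logical string = front[::-1] + back
def processStrStepB (st : List Char × List Char) (c : Char) : List Char × List Char :=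
  let front := st.1
  let back := st.2
  if PySem.Chars.islower c then (front, back ++ [c])
  else if c == '#' then (front, back ++ ((PySem.List.slice? front none none (-1)).getD front) ++ back)
  else if c == '*' && (!front.isEmpty || !back.isEmpty) then
    if back.isEmpty then
      -- back = front[::-1]; front = []; back.pop()
      match PySem.List.pop? ((PySem.List.slice? front none none (-1)).getD front) (-1) with
      | some (_, r) => ([], r)
      | none => ([], [])
    else
      match PySem.List.pop? back (-1) with
      | some (_, r) => (front, r)
      | none => (front, back)
  else (back, front)

def processStr_alt (s : String) : String :=
  let st := s.toList.foldl processStrStepB ([], [])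
  String.ofList (st.1.reverse ++ st.2)

-- ===== PRECONDITION & SPEC =====
def Spec_processStr (s : String) (out : String) : Prop := out = processStr_alt s
instance (s : String) (out : String) : Decidable (Spec_processStr s out) := by unfold Spec_processStr; infer_instance

-- ===== CLAIM (what is proved, stated in full; the proofs are below) =====
def Claim_equal_processStr : Prop := ∀ (s : String), Dom_processStr s → Spec_processStr s (processStr s)

-- ===== LEMMAS AND PROOFS =====

theorem pop_last_dropLast {α : Type} (xs : List α) (h : xs ≠ []) :
    PySem.List.pop? xs (-1) = some (xs.getLast h, xs.dropLast) := by
  have := PySem.List.pop?_last xs.dropLast (xs.getLast h)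
  rwa [List.dropLast_append_getLast h] at this

-- the loop invariant: running A's step on the concatenation equals concatenating B's step
theorem step_invariant (front back : List Char) (c : Char) :
    processStrStepA (front.reverse ++ back) c
      = (processStrStepB (front, back) c).1.reverse ++ (processStrStepB (front, back) c).2 := by
  unfold processStrStepA processStrStepB
  simp only [PySem.List.slice?_none_none_neg_one, Option.getD_some]
  by_cases h1 : PySem.Chars.islower c
  · simp [h1]
  · simp only [h1, Bool.false_eq_true, if_false]
    by_cases h2 : c = '#'
    · simp [h2]
    · simp only [beq_iff_eq, h2, if_false]
      by_cases h3 : c = '*'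
      · by_cases h5 : back = []
        · subst h5
          by_cases h4 : front = []
          · simp [h4, h3]
          · have hr : front.reverse ≠ [] := by simp [h4]
            simp only [List.append_nil]
            rw [pop_last_dropLast front.reverse hr]
            simp [h3, List.isEmpty_iff, List.length_pos_iff, h4]
        · have hne : front.reverse ++ back ≠ [] := by simp [h5]
          have hl : (decide (0 < (front.reverse ++ back).length)) = true := by
            simp only [decide_eq_true_eq, List.length_append]
            have : 0 < back.length := List.length_pos_iff.mpr h5
            omega
          rw [pop_last_dropLast _ hne, pop_last_dropLast back h5]
          simp [h3, hl, h5, List.dropLast_append_of_ne_nil h5]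
      · have hc : (c == '*') = false := by simp [h3]
        simp [hc]

theorem fold_invariant (l : List Char) (front back : List Char) :
    l.foldl processStrStepA (front.reverse ++ back)
      = (l.foldl processStrStepB (front, back)).1.reverse ++ (l.foldl processStrStepB (front, back)).2 := by
  induction l generalizing front back with
  | nil => rfl
  | cons c l ih =>
    simp only [List.foldl_cons]
    rw [step_invariant front back c]
    exact ih _ _

-- ===== VERDICT (by name: the statement is the Claim_ definition above) =====
theorem processStr_spec : Claim_equal_processStr := by
  intro s _
  unfold Spec_processStr processStr processStr_alt
  have := fold_invariant s.toList [] []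
  simpa using congrArg String.ofList this
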